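-- pv_equiv track=rewrite | github.com/alvinye9/PEPSICO_data_analysis_tools | GUI/BlindReceiverHighlighter.py | determine_section
-- ===== SOURCE A (Python) =====
-- def determine_section(a_indices, b_indices, c_indices, index):
--     # Combine the indices with section identifiers
--     sections = [(i, 'Pos') for i in a_indices] + [(i, 'Even') for i in b_indices] + [(i, 'Neg') for i in c_indices]
--     # Sort the combined list by indices
--     sections.sort()
--
--     # Iterate through the sorted sections to find the correct section
--     current_section = None
--     for i, section in sections:
--         if index < i:
--             break
--         current_section = section
--
--     return current_section
-- ===== SOURCE B (Python) =====
-- def determine_section(a_indices, b_indices, c_indices, index):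
--     # Single linear pass: running maximum (by the full (i, label) tuple) over
--     # all labelled indices i <= index; no combined list, no sort.
--     best = None
--     for label, indices in (('Pos', a_indices), ('Even', b_indices), ('Neg', c_indices)):
--         for i in indices:
--             if i <= index and (best is None or best < (i, label)):
--                 best = (i, label)
--     return None if best is None else best[1]
-- ===== Notes on version B (the rewrite author's own statement) =====
-- stated objective: faster
-- what changed: Replaces build-combined-list + sort + scan-until-break with a single linear pass keeping a running maximum of the (index, label) tuple over entries with index <= query.
import Mathlib
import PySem

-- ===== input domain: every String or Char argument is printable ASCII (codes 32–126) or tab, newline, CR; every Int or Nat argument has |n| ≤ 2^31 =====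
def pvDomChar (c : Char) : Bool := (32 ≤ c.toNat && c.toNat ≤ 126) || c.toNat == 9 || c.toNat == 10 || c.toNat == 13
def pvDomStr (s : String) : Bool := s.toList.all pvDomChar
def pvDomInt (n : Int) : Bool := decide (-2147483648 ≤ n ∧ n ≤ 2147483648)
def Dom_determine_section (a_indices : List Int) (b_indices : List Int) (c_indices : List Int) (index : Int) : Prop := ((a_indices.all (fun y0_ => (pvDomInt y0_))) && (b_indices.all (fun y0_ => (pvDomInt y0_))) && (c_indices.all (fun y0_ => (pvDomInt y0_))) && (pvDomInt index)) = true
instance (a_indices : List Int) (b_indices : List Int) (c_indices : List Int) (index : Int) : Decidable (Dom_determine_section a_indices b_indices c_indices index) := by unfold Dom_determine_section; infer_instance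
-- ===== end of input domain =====

-- B replaces A's build-list + sort + scan-until-break with one linear pass keeping a running
-- lexicographic maximum of (index, label) over qualifying entries; proved to return A's exact value.


-- ===== PORT A =====
-- the 'for i, section in sections: if index < i: break; current_section = section' loop
def dsLoopA (index : Int) : List (Int × String) → Option String → Option String
  | [], cur => cur
  | (i, s) :: rest, cur => if index < i then cur else dsLoopA index rest (some s)

def determine_section (a_indices : List Int) (b_indices : List Int) (c_indices : List Int) (index : Int) : Option String :=
  let sections := a_indices.map (fun i => (i, "Pos")) ++ b_indices.map (fun i => (i, "Even")) ++ c_indices.map (fun i => (i, "Neg"))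
  -- sections.sort() on (int, str) tuples = lexicographic sort on the pair
  dsLoopA index (PySem.List.sorted2 sections Prod.fst Prod.snd) none

-- ===== PORT B =====
-- Python tuple comparison 'm < p' on (int, str)
def lltB (m p : Int × String) : Bool := decide (m.1 < p.1) || (!decide (p.1 < m.1) && decide (m.2 < p.2))

-- 'best is None or best < (i, label)'
def bLtB : Option (Int × String) → (Int × String) → Bool
  | none, _ => true
  | some m, p => lltB m p

-- the inner 'for i in indices' loop with accumulator best
def dsScanB (index : Int) (label : String) : List Int → Option (Int × String) → Option (Int × String)
  | [], best => best
  | i :: rest, best =>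
      dsScanB index label rest (if i ≤ index && bLtB best (i, label) then some (i, label) else best)

def determine_section_alt (a_indices : List Int) (b_indices : List Int) (c_indices : List Int) (index : Int) : Option String :=
  let best := dsScanB index "Neg" c_indices (dsScanB index "Even" b_indices (dsScanB index "Pos" a_indices none))
  best.map Prod.snd

-- ===== PRECONDITION & SPEC =====
def Spec_determine_section (a_indices : List Int) (b_indices : List Int) (c_indices : List Int) (index : Int) (out : Option String) : Prop := out = determine_section_alt a_indices b_indices c_indices index
instance (a_indices : List Int) (b_indices : List Int) (c_indices : List Int) (index : Int) (out : Option String) : Decidable (Spec_determine_section a_indices b_indices c_indices index out) := by unfold Spec_determine_section; infer_instance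

-- ===== CLAIM (what is proved, stated in full; the proofs are below) =====
def Claim_equal_determine_section : Prop := ∀ (a_indices : List Int) (b_indices : List Int) (c_indices : List Int) (index : Int), Dom_determine_section a_indices b_indices c_indices index → Spec_determine_section a_indices b_indices c_indices index (determine_section a_indices b_indices c_indices index)

-- ===== LEMMAS AND PROOFS =====

-- lexicographic ≤ on (Int, String) pairs
def lleP (a b : Int × String) : Prop := a.1 < b.1 ∨ (a.1 = b.1 ∧ a.2 ≤ b.2)

theorem lltB_true_iff (a b : Int × String) :
    lltB a b = true ↔ (a.1 < b.1 ∨ (a.1 = b.1 ∧ a.2 < b.2)) := by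
  unfold lltB
  rw [Bool.or_eq_true, Bool.and_eq_true, Bool.not_eq_true', decide_eq_true_eq,
    decide_eq_true_eq, decide_eq_false_iff_not]
  constructor
  · rintro (h | ⟨h1, h2⟩)
    · exact Or.inl h
    · by_cases ha : a.1 < b.1
      · exact Or.inl ha
      · exact Or.inr ⟨by omega, h2⟩
  · rintro (h | ⟨h1, h2⟩)
    · exact Or.inl h
    · exact Or.inr ⟨by omega, h2⟩

theorem lltB_false_iff (a b : Int × String) :
    lltB a b = false ↔ lleP b a := by
  rw [show (lltB a b = false) ↔ ¬ (lltB a b = true) from by simp, lltB_true_iff]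
  unfold lleP
  push_neg
  constructor
  · rintro ⟨h1, h2⟩
    by_cases hb : b.1 < a.1
    · exact Or.inl hb
    · have he : a.1 = b.1 := by omega
      exact Or.inr ⟨he.symm, le_of_not_gt (h2 he)⟩
  · rintro (h | ⟨he, hle⟩)
    · exact ⟨by omega, fun he => absurd he (by omega)⟩
    · exact ⟨by omega, fun _ => not_lt.mpr hle⟩

theorem lleP_of_lltB {a b : Int × String} (h : lltB a b = true) : lleP a b := by
  rcases (lltB_true_iff a b).mp h with h' | ⟨he, hlt⟩
  · exact Or.inl h'
  · exact Or.inr ⟨he, le_of_lt hlt⟩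

theorem lleP_trans {a b c : Int × String} (h1 : lleP a b) (h2 : lleP b c) : lleP a c := by
  rcases h1 with h1 | ⟨e1, l1⟩ <;> rcases h2 with h2 | ⟨e2, l2⟩
  · exact Or.inl (by omega)
  · exact Or.inl (by omega)
  · exact Or.inl (by omega)
  · exact Or.inr ⟨by omega, le_trans l1 l2⟩

theorem lleP_antisymm {a b : Int × String} (h1 : lleP a b) (h2 : lleP b a) : a = b := by
  rcases h1 with h1 | ⟨e1, l1⟩ <;> rcases h2 with h2 | ⟨e2, l2⟩ <;>
    first
      | omega
      | (exact absurd h1 (by omega))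
      | (exact absurd h2 (by omega))
      | (exact Prod.ext (by omega) (le_antisymm l1 l2))

-- "r is the lexicographic maximum of the entries of L whose index is ≤ index (none if there are none)"
def isMaxQ (index : Int) (L : List (Int × String)) : Option (Int × String) → Prop
  | none => ∀ p ∈ L, ¬ p.1 ≤ index
  | some m => m ∈ L ∧ m.1 ≤ index ∧ ∀ p ∈ L, p.1 ≤ index → lleP p m

theorem isMaxQ_congr {index : Int} {L L' : List (Int × String)} {r : Option (Int × String)}
    (h : ∀ x, x ∈ L ↔ x ∈ L') (hm : isMaxQ index L r) : isMaxQ index L' r := by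
  cases r with
  | none => exact fun p hp => hm p ((h p).mpr hp)
  | some m =>
      obtain ⟨h1, h2, h3⟩ := hm
      exact ⟨(h m).mp h1, h2, fun p hp hq => h3 p ((h p).mpr hp) hq⟩

-- one update step of B's running maximum
theorem maxQ_step {index : Int} {S : List (Int × String)} {best : Option (Int × String)}
    (p : Int × String) (h : isMaxQ index S best) :
    isMaxQ index (S ++ [p]) (if p.1 ≤ index && bLtB best p then some p else best) := by
  by_cases hq : p.1 ≤ index
  · by_cases hb : bLtB best p = true
    · simp only [hq, hb, decide_true, Bool.and_self, if_pos]
      refine ⟨List.mem_append_right _ (List.mem_singleton_self p), hq, ?_⟩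
      intro q hqmem hqq
      rcases List.mem_append.mp hqmem with hqS | hqp
      · cases best with
        | none => exact absurd hqq (h q hqS)
        | some m =>
            obtain ⟨_, _, h3⟩ := h
            exact lleP_trans (h3 q hqS hqq) (lleP_of_lltB hb)
      · rw [List.mem_singleton.mp hqp]
        exact Or.inr ⟨rfl, le_refl _⟩
    · cases best with
      | none => exact absurd rfl hb
      | some m =>
          have hplem : lleP p m := (lltB_false_iff m p).mp (by
            cases hx : lltB m p
            · rfl
            · exact absurd hx hb)
          simp only [Bool.eq_false_iff.mpr hb, Bool.and_false, if_neg, Bool.false_eq_true,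
            not_false_iff]
          obtain ⟨h1, h2, h3⟩ := h
          refine ⟨List.mem_append_left _ h1, h2, ?_⟩
          intro q hqmem hqq
          rcases List.mem_append.mp hqmem with hqS | hqp
          · exact h3 q hqS hqq
          · rw [List.mem_singleton.mp hqp]; exact hplem
  · simp only [hq, decide_false, Bool.false_and, if_neg, Bool.false_eq_true, not_false_iff]
    cases best with
    | none =>
        intro q hqmem
        rcases List.mem_append.mp hqmem with hqS | hqp
        · exact h q hqS
        · rw [List.mem_singleton.mp hqp]; exact hq
    | some m =>
        obtain ⟨h1, h2, h3⟩ := h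
        refine ⟨List.mem_append_left _ h1, h2, ?_⟩
        intro q hqmem hqq
        rcases List.mem_append.mp hqmem with hqS | hqp
        · exact h3 q hqS hqq
        · exact absurd hqq (by rw [List.mem_singleton.mp hqp] at hqq ⊢; exact absurd hqq hq)

-- B's inner loop extends the running maximum over the labelled entries of l
theorem dsScanB_max (index : Int) (label : String) (l : List Int) :
    ∀ (S : List (Int × String)) (best : Option (Int × String)), isMaxQ index S best →
      isMaxQ index (S ++ l.map (fun i => (i, label))) (dsScanB index label l best) := by
  induction l with
  | nil => intro S best h; simpa [dsScanB] using h
  | cons i rest ih =>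
      intro S best h
      have hstep := maxQ_step (S := S) (best := best) (i, label) h
      have := ih (S ++ [(i, label)]) _ hstep
      simpa [dsScanB, List.append_assoc] using this

-- A's loop over a lexicographically sorted list returns the label of the maximum qualifying entry
theorem dsLoopA_eq (index : Int) :
    ∀ (L : List (Int × String)), L.Pairwise lleP →
      ∀ (cur : Option String) (r : Option (Int × String)), isMaxQ index L r →
        dsLoopA index L cur = (match r with | none => cur | some m => some m.2) := by
  intro L
  induction L with
  | nil =>
      intro _ cur r hr
      cases r with
      | none => rfl
      | some m => exact absurd hr.1 (List.not_mem_nil)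
  | cons hd tl ih =>
      intro hpw cur r hr
      obtain ⟨i, s⟩ := hd
      have hpw' := (List.pairwise_cons.mp hpw)
      by_cases hbr : index < i
      · -- break: nothing in the list qualifies
        have hnone : r = none := by
          cases r with
          | none => rfl
          | some m =>
              obtain ⟨h1, h2, _⟩ := hr
              rcases List.mem_cons.mp h1 with he | hm
              · rw [he] at h2; omega
              · have := hpw'.1 m hm
                rcases this with h' | ⟨he', _⟩ <;> simp_all <;> omega
        rw [hnone]
        simp [dsLoopA, hbr]
      · -- head qualifies; recurse with cur = some s
        have hq : i ≤ index := by omega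
        simp only [dsLoopA, if_neg hbr]
        by_cases ht : ∃ q ∈ tl, q.1 ≤ index
        · -- the maximum lives in the tail
          cases r with
          | none => exact absurd hq (hr (i, s) List.mem_cons_self)
          | some m =>
              obtain ⟨h1, h2, h3⟩ := hr
              have hmtl : m ∈ tl := by
                rcases List.mem_cons.mp h1 with he | hm
                · obtain ⟨q, hqtl, hqq⟩ := ht
                  have hle1 : lleP q m := h3 q (List.mem_cons_of_mem _ hqtl) hqq
                  have hle2 : lleP m q := by rw [he]; exact hpw'.1 q hqtl
                  rw [lleP_antisymm hle2 hle1]; exact hqtl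
                · exact hm
              exact ih hpw'.2 (some s) (some m)
                ⟨hmtl, h2, fun p hp hpq => h3 p (List.mem_cons_of_mem _ hp) hpq⟩
        · -- the head is the maximum
          push_neg at ht
          have htn : isMaxQ index tl none := fun q hq => by have := ht q hq; omega
          have hrm : r = some (i, s) := by
            cases r with
            | none => exact absurd hq (hr (i, s) List.mem_cons_self)
            | some m =>
                obtain ⟨h1, h2, h3⟩ := hr
                rcases List.mem_cons.mp h1 with he | hm
                · rw [he]
                · exact absurd h2 (htn m hm)
          rw [hrm]
          have := ih hpw'.2 (some s) none htn
          simpa using this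

-- PySem's insertion sort with the lexicographic 'before' test keeps the list lleP-sorted
theorem insertBy_pairwise (x : Int × String) :
    ∀ (acc : List (Int × String)), acc.Pairwise lleP →
      (PySem.List.insertBy (fun a b => lltB a b) x acc).Pairwise lleP := by
  intro acc
  induction acc with
  | nil => intro _; simp [PySem.List.insertBy]
  | cons y ys ih =>
      intro hpw
      have hpw' := List.pairwise_cons.mp hpw
      by_cases hb : lltB x y = true
      · simp only [PySem.List.insertBy, hb, if_pos]
        refine List.pairwise_cons.mpr ⟨?_, hpw⟩
        intro z hz
        rcases List.mem_cons.mp hz with he | hm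
        · rw [he]; exact lleP_of_lltB hb
        · exact lleP_trans (lleP_of_lltB hb) (hpw'.1 z hm)
      · have hyx : lleP y x := (lltB_false_iff x y).mp (by
          cases hx : lltB x y
          · rfl
          · exact absurd hx hb)
        simp only [PySem.List.insertBy, hb, if_neg, Bool.false_eq_true, not_false_iff]
        refine List.pairwise_cons.mpr ⟨?_, ih hpw'.2⟩
        intro z hz
        rcases (PySem.List.mem_insertBy _ _ _ _).mp hz with he | hm
        · rw [he]; exact hyx
        · exact hpw'.1 z hm

theorem foldl_insertBy_pairwise (xs : List (Int × String)) :
    ∀ (acc : List (Int × String)), acc.Pairwise lleP →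
      (xs.foldl (fun acc x => PySem.List.insertBy (fun a b => lltB a b) x acc) []).Pairwise lleP := by
  have key : ∀ (ys : List (Int × String)) (acc : List (Int × String)), acc.Pairwise lleP →
      (ys.foldl (fun acc x => PySem.List.insertBy (fun a b => lltB a b) x acc) acc).Pairwise lleP := by
    intro ys
    induction ys with
    | nil => intro acc h; simpa using h
    | cons y t ih =>
        intro acc h
        exact ih _ (insertBy_pairwise y acc h)
  intro _ _
  exact key xs [] (by simp)

theorem sorted2_pairwise_lleP (xs : List (Int × String)) :
    (PySem.List.sorted2 xs Prod.fst Prod.snd).Pairwise lleP := by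
  have heq : PySem.List.sorted2 xs Prod.fst Prod.snd
      = xs.foldl (fun acc x => PySem.List.insertBy (fun a b => lltB a b) x acc) [] := rfl
  rw [heq]
  exact foldl_insertBy_pairwise xs [] (by simp)

-- ===== VERDICT (by name: the statement is the Claim_ definition above) =====
theorem determine_section_spec : Claim_equal_determine_section := by
  intro a_indices b_indices c_indices index _
  unfold Spec_determine_section determine_section determine_section_alt
  simp only []
  set mapA := a_indices.map (fun i => (i, "Pos")) with hA
  set mapB := b_indices.map (fun i => (i, "Even")) with hB
  set mapC := c_indices.map (fun i => (i, "Neg")) with hC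
  set sections := mapA ++ mapB ++ mapC with hS
  -- B computes the lexicographic maximum of the qualifying entries of sections
  have h0 : isMaxQ index ([] : List (Int × String)) none := by
    intro p hp; exact absurd hp (List.not_mem_nil)
  have h1 := dsScanB_max index "Pos" a_indices [] none h0
  rw [List.nil_append] at h1
  have h2 := dsScanB_max index "Even" b_indices mapA _ h1
  have h3 := dsScanB_max index "Neg" c_indices (mapA ++ mapB) _ h2
  set best := dsScanB index "Neg" c_indices
      (dsScanB index "Even" b_indices (dsScanB index "Pos" a_indices none)) with hbest
  have hBmax : isMaxQ index sections best := h3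
  -- transfer the maximum to the sorted list (same members)
  have hperm := PySem.List.sorted2_perm sections Prod.fst Prod.snd false
  have hmem : ∀ x, x ∈ sections ↔ x ∈ PySem.List.sorted2 sections Prod.fst Prod.snd :=
    fun x => (hperm.mem_iff).symm
  have hSmax := isMaxQ_congr hmem hBmax
  have hpw := sorted2_pairwise_lleP sections
  have hA := dsLoopA_eq index _ hpw none best hSmax
  rw [hA]
  cases best <;> rfl
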